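-- pv_equiv track=rewrite | github.com/ameirtheshaa/PINNs | Scripts_v2/definitions.py | get_list_of_directions
-- ===== SOURCE A (Python) =====
-- def get_list_of_directions(list_of_directions):
--
--     variables_to_plot = []
--
--     for direction1 in list_of_directions:
--         for direction2 in list_of_directions:
--             if direction2 != direction1:
--                 x = [direction1,direction2]
--                 y = [direction2,direction1]
--                 if x not in variables_to_plot:
--                     if y not in variables_to_plot:
--                         variables_to_plot.append(x)
--
--     return variables_to_plot
-- ===== SOURCE B (Python) =====
-- def get_list_of_directions(list_of_directions):
--     seen = set()
--     result = []
--     tail = list(list_of_directions)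
--     while tail:
--         d1 = tail.pop(0)
--         for d2 in tail:
--             if d1 != d2 and (d1, d2) not in seen:
--                 seen.add((d1, d2))
--                 seen.add((d2, d1))
--                 result.append([d1, d2])
--     return result
-- ===== Notes on version B (the rewrite author's own statement) =====
-- stated objective: faster
-- what changed: Replaces A's full n×n scan with list-membership tests over the growing result by a triangular scan (each element paired only with later elements) that dedups via a seen-set, so the inner result-list scans disappear.
import Mathlib
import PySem

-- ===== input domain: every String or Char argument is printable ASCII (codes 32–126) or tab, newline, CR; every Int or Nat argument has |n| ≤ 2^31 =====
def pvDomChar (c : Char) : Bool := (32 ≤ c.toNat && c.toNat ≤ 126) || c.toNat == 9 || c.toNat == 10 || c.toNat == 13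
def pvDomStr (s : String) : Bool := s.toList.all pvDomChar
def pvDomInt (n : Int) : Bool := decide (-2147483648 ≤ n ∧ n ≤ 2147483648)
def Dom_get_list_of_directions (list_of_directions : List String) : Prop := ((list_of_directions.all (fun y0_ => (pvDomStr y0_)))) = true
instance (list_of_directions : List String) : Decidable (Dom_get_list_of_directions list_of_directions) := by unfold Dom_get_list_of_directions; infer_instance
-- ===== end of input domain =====

-- B replaces A's full n×n scan with repeated list-membership tests by a triangular
-- scan (each first element paired only with the elements after it) and a seen-set,
-- removing the quadratic inner membership scans (objective: faster).

-- ===== PORT A =====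
-- inner 'for direction2 in l2' loop of A, for a fixed direction1
def innerA (direction1 : String) (l2 : List String) (acc : List (List String)) :
    List (List String) :=
  l2.foldl (fun acc direction2 =>
    if direction2 ≠ direction1 then
      if [direction1, direction2] ∉ acc then
        if [direction2, direction1] ∉ acc then acc ++ [[direction1, direction2]]
        else acc
      else acc
    else acc) acc

def get_list_of_directions (list_of_directions : List String) : List (List String) :=
  list_of_directions.foldl
    (fun acc direction1 => innerA direction1 list_of_directions acc) []

-- ===== PORT B =====
-- body of B's 'for d2 in tail' loop: state = (seen set, result list)
def altBody (d1 : String) (st : PySem.Set (String × String) × List (List String))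
    (d2 : String) : PySem.Set (String × String) × List (List String) :=
  if d1 ≠ d2 ∧ (d1, d2) ∉ st.1 then
    (PySem.Set.add (PySem.Set.add st.1 (d1, d2)) (d2, d1), st.2 ++ [[d1, d2]])
  else st

-- B's 'while tail' loop: pop the front element, pair it with the rest
def altOuter : List String → PySem.Set (String × String) → List (List String) →
    List (List String)
  | [], _, result => result
  | d1 :: tail, seen, result =>
    let st := tail.foldl (altBody d1) (seen, result)
    altOuter tail st.1 st.2

def get_list_of_directions_alt (list_of_directions : List String) : List (List String) :=
  altOuter list_of_directions PySem.Set.empty []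

-- ===== PRECONDITION & SPEC =====
def Spec_get_list_of_directions (list_of_directions : List String) (out : List (List String)) : Prop := out = get_list_of_directions_alt list_of_directions
instance (list_of_directions : List String) (out : List (List String)) : Decidable (Spec_get_list_of_directions list_of_directions out) := by unfold Spec_get_list_of_directions; infer_instance

-- ===== CLAIM (what is proved, stated in full; the proofs are below) =====
def Claim_equal_get_list_of_directions : Prop := ∀ (list_of_directions : List String), Dom_get_list_of_directions list_of_directions → Spec_get_list_of_directions list_of_directions (get_list_of_directions list_of_directions)

-- ===== LEMMAS AND PROOFS =====

-- the unordered pair {u,v} is already recorded in acc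
def covered (acc : List (List String)) (u v : String) : Prop :=
  [u, v] ∈ acc ∨ [v, u] ∈ acc

-- common reference computation: triangular scan with list-membership tests
def spec : List String → List (List String) → List (List String)
  | [], acc => acc
  | d1 :: rest, acc => spec rest (innerA d1 rest acc)

theorem innerA_append (d1 : String) (xs ys : List String) (acc : List (List String)) :
    innerA d1 (xs ++ ys) acc = innerA d1 ys (innerA d1 xs acc) := by
  simp [innerA, List.foldl_append]

theorem innerA_mono (d1 : String) (xs : List String) (acc : List (List String)) :
    ∃ ext, innerA d1 xs acc = acc ++ ext := by
  induction xs generalizing acc with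
  | nil => exact ⟨[], by simp [innerA]⟩
  | cons d2 rest ih =>
    simp only [innerA, List.foldl_cons] at *
    by_cases h1 : d2 ≠ d1
    · by_cases h2 : [d1, d2] ∈ acc
      · simpa [h1, h2] using ih acc
      · by_cases h3 : [d2, d1] ∈ acc
        · simpa [h1, h2, h3] using ih acc
        · obtain ⟨ext, he⟩ := ih (acc ++ [[d1, d2]])
          refine ⟨[[d1, d2]] ++ ext, ?_⟩
          rw [if_pos h1, if_pos h2, if_pos h3, he, List.append_assoc]
    · simpa [h1] using ih acc

theorem covered_mono {acc : List (List String)} (ext : List (List String)) {u v : String}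
    (h : covered acc u v) : covered (acc ++ ext) u v := by
  rcases h with h | h
  · exact Or.inl (List.mem_append_left _ h)
  · exact Or.inr (List.mem_append_left _ h)

theorem innerA_noop (d1 : String) (xs : List String) (acc : List (List String))
    (h : ∀ d2 ∈ xs, d2 = d1 ∨ covered acc d1 d2) : innerA d1 xs acc = acc := by
  induction xs generalizing acc with
  | nil => simp [innerA]
  | cons d2 rest ih =>
    simp only [innerA, List.foldl_cons]
    have hd := h d2 (by simp)
    have hrest : ∀ x ∈ rest, x = d1 ∨ covered acc d1 x :=
      fun x hx => h x (List.mem_cons_of_mem _ hx)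
    rcases hd with hd | hd
    · simp only [hd, ne_eq, not_true_eq_false, if_false]
      exact ih acc hrest
    · rcases hd with hc | hc
      · simp only [hc, not_true_eq_false, if_false, ite_self]
        exact ih acc hrest
      · simp only [hc, not_true_eq_false, if_false, ite_self]
        exact ih acc hrest

theorem innerA_covers (d1 : String) (xs : List String) (acc : List (List String)) :
    ∀ v ∈ xs, v = d1 ∨ covered (innerA d1 xs acc) d1 v := by
  induction xs generalizing acc with
  | nil => simp
  | cons d2 rest ih =>
    intro v hv
    simp only [innerA, List.foldl_cons]
    rcases List.mem_cons.mp hv with hv | hv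
    · -- v = d2 : after the first step the pair is covered (then monotone)
      subst hv
      by_cases h1 : v = d1
      · exact Or.inl h1
      · right
        set acc1 := if v ≠ d1 then
            (if [d1, v] ∉ acc then
              (if [v, d1] ∉ acc then acc ++ [[d1, v]] else acc)
             else acc)
          else acc with hacc1
        have hcov : covered acc1 d1 v := by
          rw [hacc1, if_pos (show v ≠ d1 from h1)]
          by_cases h2 : [d1, v] ∈ acc
          · rw [if_neg (not_not_intro h2)]; exact Or.inl h2
          · rw [if_pos h2]
            by_cases h3 : [v, d1] ∈ acc
            · rw [if_neg (not_not_intro h3)]; exact Or.inr h3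
            · rw [if_pos h3]; exact Or.inl (by simp)
        obtain ⟨ext, he⟩ := innerA_mono d1 rest acc1
        have := covered_mono ext hcov
        rw [← he] at this
        exact this
    · exact ih _ v hv

theorem outer_eq (l : List String) :
    ∀ (tail p : List String) (acc : List (List String)), l = p ++ tail →
    (∀ u ∈ p, ∀ v ∈ l, v ≠ u → covered acc u v) →
    tail.foldl (fun acc d1 => innerA d1 l acc) acc = spec tail acc := by
  intro tail
  induction tail with
  | nil => intro p acc _ _; simp [spec]
  | cons d1 rest ih =>
    intro p acc hl hcov
    simp only [List.foldl_cons, spec]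
    have hsplit : l = (p ++ [d1]) ++ rest := by simp [hl]
    -- the prefix part of the inner scan is a no-op
    have hnoop : innerA d1 (p ++ [d1]) acc = acc := by
      apply innerA_noop
      intro x hx
      rcases List.mem_append.mp hx with hx | hx
      · by_cases hxd : x = d1
        · exact Or.inl hxd
        · right
          have := hcov x hx d1 (by simp [hl]) (fun h => hxd h.symm)
          rcases this with h | h
          · exact Or.inr h
          · exact Or.inl h
      · simp at hx; exact Or.inl hx
    have hinner : innerA d1 l acc = innerA d1 rest acc := by
      rw [hsplit, innerA_append, hnoop]
    rw [hinner]
    -- re-establish the coverage invariant for p ++ [d1]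
    obtain ⟨ext, he⟩ := innerA_mono d1 rest acc
    apply ih (p ++ [d1]) (innerA d1 rest acc) hsplit
    intro u hu v hv hvu
    rcases List.mem_append.mp hu with hu | hu
    · have := hcov u hu v hv hvu
      rw [he]; exact covered_mono ext this
    · simp at hu; subst hu
      rcases List.mem_append.mp (hsplit ▸ hv) with hv' | hv'
      · rcases List.mem_append.mp hv' with hv' | hv'
        · have := hcov v hv' u (by simp [hl]) (fun h => hvu h.symm)
          rcases this with h | h
          · rw [he]; exact covered_mono ext (Or.inr h)
          · rw [he]; exact covered_mono ext (Or.inl h)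
        · simp at hv'; exact absurd hv' hvu
      · have := innerA_covers u rest acc v hv'
        rcases this with h | h
        · exact absurd h hvu
        · exact h

theorem A_eq_spec (l : List String) : get_list_of_directions l = spec l [] := by
  unfold get_list_of_directions
  exact outer_eq l l [] [] rfl (by simp)

-- B-side: the seen set records exactly the covered pairs of the result
def SeenInv (seen : PySem.Set (String × String)) (res : List (List String)) : Prop :=
  ∀ u v : String, (u, v) ∈ seen ↔ covered res u v

theorem innerB_eq (d1 : String) (xs : List String)
    (seen : PySem.Set (String × String)) (res : List (List String))
    (hinv : SeenInv seen res) :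
    xs.foldl (altBody d1) (seen, res) =
      ((xs.foldl (altBody d1) (seen, res)).1, innerA d1 xs res) ∧
    SeenInv (xs.foldl (altBody d1) (seen, res)).1 (xs.foldl (altBody d1) (seen, res)).2 := by
  induction xs generalizing seen res with
  | nil => exact ⟨by simp [innerA], hinv⟩
  | cons d2 rest ih =>
    simp only [List.foldl_cons, innerA, List.foldl_cons]
    by_cases hne : d1 = d2
    · have hb : altBody d1 (seen, res) d2 = (seen, res) := by
        simp [altBody, hne]
      rw [hb]
      have h2 : (if d2 ≠ d1 then
          (if [d1, d2] ∉ res then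
            (if [d2, d1] ∉ res then res ++ [[d1, d2]] else res) else res)
        else res) = res := by simp [hne]
      rw [h2]
      exact ih seen res hinv
    · by_cases hmem : (d1, d2) ∈ seen
      · have hb : altBody d1 (seen, res) d2 = (seen, res) := by
          simp [altBody, hmem]
        rw [hb]
        have hcov := (hinv d1 d2).mp hmem
        have h2 : (if d2 ≠ d1 then
            (if [d1, d2] ∉ res then
              (if [d2, d1] ∉ res then res ++ [[d1, d2]] else res) else res)
          else res) = res := by
          rcases hcov with h | h <;> simp [h]
        rw [h2]
        exact ih seen res hinv
      · have hb : altBody d1 (seen, res) d2 =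
            (PySem.Set.add (PySem.Set.add seen (d1, d2)) (d2, d1), res ++ [[d1, d2]]) := by
          simp [altBody, hne, hmem]
        rw [hb]
        have hncov : ¬ covered res d1 d2 := fun h => hmem ((hinv d1 d2).mpr h)
        have h2 : (if d2 ≠ d1 then
            (if [d1, d2] ∉ res then
              (if [d2, d1] ∉ res then res ++ [[d1, d2]] else res) else res)
          else res) = res ++ [[d1, d2]] := by
          have h3 : [d1, d2] ∉ res := fun h => hncov (Or.inl h)
          have h4 : [d2, d1] ∉ res := fun h => hncov (Or.inr h)
          simp [h3, h4, Ne.symm hne]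
        rw [h2]
        apply ih
        intro u v
        constructor
        · intro h
          rcases (PySem.Set.mem_add _ _ _).mp h with h | h
          · rcases (PySem.Set.mem_add _ _ _).mp h with h | h
            · exact covered_mono _ ((hinv u v).mp h)
            · obtain ⟨h1, h2'⟩ := Prod.mk.injEq .. ▸ h
              subst h1; subst h2'
              exact Or.inl (by simp)
          · obtain ⟨h1, h2'⟩ := Prod.mk.injEq .. ▸ h
            subst h1; subst h2'
            exact Or.inr (by simp)
        · intro h
          rcases h with h | h
          · rcases List.mem_append.mp h with h | h
            · exact (PySem.Set.mem_add _ _ _).mpr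
                (Or.inl ((PySem.Set.mem_add _ _ _).mpr (Or.inl ((hinv u v).mpr (Or.inl h)))))
            · simp at h
              obtain ⟨h1, h2'⟩ := h
              subst h1; subst h2'
              exact (PySem.Set.mem_add _ _ _).mpr
                (Or.inl ((PySem.Set.mem_add _ _ _).mpr (Or.inr rfl)))
          · rcases List.mem_append.mp h with h | h
            · exact (PySem.Set.mem_add _ _ _).mpr
                (Or.inl ((PySem.Set.mem_add _ _ _).mpr (Or.inl ((hinv u v).mpr (Or.inr h)))))
            · simp at h
              obtain ⟨h1, h2'⟩ := h
              subst h1; subst h2'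
              exact (PySem.Set.mem_add _ _ _).mpr (Or.inr rfl)

theorem altOuter_eq :
    ∀ (tail : List String) (seen : PySem.Set (String × String)) (res : List (List String)),
    SeenInv seen res → altOuter tail seen res = spec tail res := by
  intro tail
  induction tail with
  | nil => intro seen res _; simp [altOuter, spec]
  | cons d1 rest ih =>
    intro seen res hinv
    obtain ⟨heq, hinv'⟩ := innerB_eq d1 rest seen res hinv
    simp only [altOuter, spec]
    rw [heq] at hinv' ⊢
    exact ih _ _ hinv'

theorem B_eq_spec (l : List String) : get_list_of_directions_alt l = spec l [] := by
  unfold get_list_of_directions_alt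
  apply altOuter_eq
  intro u v
  simp [PySem.Set.empty, covered]

-- ===== VERDICT (by name: the statement is the Claim_ definition above) =====
theorem get_list_of_directions_spec : Claim_equal_get_list_of_directions := by
  intro l _
  unfold Spec_get_list_of_directions
  rw [A_eq_spec, B_eq_spec]
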